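-- pv_equiv track=rewrite | github.com/HarunFeraidon/Hangman-on-Discord | hangman_game.py | setup_game
-- ===== SOURCE A (Python) =====
-- def setup_game(phrase):
--     missing_letters = {}
--     censored_phrase = []
--     # build censored phrase and dict of missing letters
--     for idx, letter in enumerate(phrase):
--         if letter != " ":
--             censored_phrase += "-"
--             missing_letters.setdefault(letter, []).append(idx)
--         else:
--             censored_phrase += " "
--     return missing_letters, censored_phrase
-- ===== SOURCE B (Python) =====
-- def setup_game(phrase):
--     # censored phrase: one comprehension over the characters
--     censored_phrase = [' ' if ch == ' ' else '-' for ch in phrase]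
--     # one pass per distinct letter (first-occurrence order), instead of one
--     # combined pass with setdefault
--     missing_letters = {c: [i for i, ch in enumerate(phrase) if ch == c]
--                        for c in dict.fromkeys(phrase) if c != ' '}
--     return missing_letters, censored_phrase
-- ===== Notes on version B (the rewrite author's own statement) =====
-- stated objective: alternative
-- what changed: Replaces A's single stateful pass (building both outputs at once via dict setdefault/append) with two independent comprehensions: the censored list by a direct map over the characters, and the letter-position dict by one index scan per distinct letter taken in first-occurrence order (dict.fromkeys).
import Mathlib
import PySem

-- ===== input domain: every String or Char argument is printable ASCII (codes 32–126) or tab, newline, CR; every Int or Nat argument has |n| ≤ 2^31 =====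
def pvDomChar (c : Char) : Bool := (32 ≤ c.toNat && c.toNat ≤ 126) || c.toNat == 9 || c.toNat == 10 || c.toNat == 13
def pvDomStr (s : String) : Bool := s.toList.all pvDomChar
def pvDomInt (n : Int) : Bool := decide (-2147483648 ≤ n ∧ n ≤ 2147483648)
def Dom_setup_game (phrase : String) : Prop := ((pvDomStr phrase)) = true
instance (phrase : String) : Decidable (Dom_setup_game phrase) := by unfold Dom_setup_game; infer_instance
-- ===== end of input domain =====

-- B replaces A's single combined setdefault pass by two independent comprehensions
-- (censored list; one index scan per distinct letter) — objective: alternative decomposition.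

-- ===== PORT A =====
-- a character of a Python str, indexed out as a 1-character Python str
def chStr (c : Char) : String := String.ofList [c]

-- loop body of A: `missing_letters.setdefault(letter, []).append(idx)` mutates the
-- stored list in place, which is exactly Dict.modify letter [] (· ++ [idx])
-- (same key order: a fresh key is appended, an existing one keeps its place).
def setupStepA (st : PySem.Dict String (List Int) × List String) (p : Int × Char) :
    PySem.Dict String (List Int) × List String :=
  if chStr p.2 ≠ " " then
    (st.1.modify (chStr p.2) [] (· ++ [p.1]), st.2 ++ ["-"])
  else
    (st.1, st.2 ++ [" "])

def setup_game (phrase : String) : (List (String × List Int)) × List String :=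
  let st := (PySem.List.enumerate phrase.toList 0).foldl setupStepA (PySem.Dict.empty, [])
  (st.1.items, st.2)

-- ===== PORT B =====
def setup_game_alt (phrase : String) : (List (String × List Int)) × List String :=
  let cs := phrase.toList
  let censored := cs.map (fun ch => if ch = ' ' then " " else "-")
  -- dict comprehension over dict.fromkeys(phrase) (= PySem.List.dedup): the keys are
  -- distinct and in first-occurrence order, so its items are exactly this list
  let missing := ((PySem.List.dedup cs).filter (fun c => decide (c ≠ ' '))).map
      (fun c => (chStr c,
        ((PySem.List.enumerate cs 0).filter (fun p => decide (p.2 = c))).map (·.1)))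
  (missing, censored)

-- ===== PRECONDITION & SPEC =====
def Spec_setup_game (phrase : String) (out : (List (String × List Int)) × List String) : Prop := out = setup_game_alt phrase
instance (phrase : String) (out : (List (String × List Int)) × List String) : Decidable (Spec_setup_game phrase out) := by unfold Spec_setup_game; infer_instance

-- ===== CLAIM (what is proved, stated in full; the proofs are below) =====
def Claim_equal_setup_game : Prop := ∀ (phrase : String), Dom_setup_game phrase → Spec_setup_game phrase (setup_game phrase)

-- ===== LEMMAS AND PROOFS =====

theorem chStr_inj {a b : Char} (h : chStr a = chStr b) : a = b := by
  have := congrArg String.toList h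
  simpa [chStr] using this

theorem chStr_ne_space (c : Char) : (chStr c ≠ " ") ↔ (c ≠ ' ') := by
  constructor
  · intro h hc; exact h (by simp [hc, chStr])
  · intro h hc; exact h (chStr_inj (by simpa [chStr] using hc))

-- the dict-only part of A's loop body
def dStepA (d : PySem.Dict String (List Int)) (p : Int × Char) : PySem.Dict String (List Int) :=
  if chStr p.2 ≠ " " then d.modify (chStr p.2) [] (· ++ [p.1]) else d

-- split A's two-component state
theorem foldA_split (l : List (Int × Char)) (d : PySem.Dict String (List Int)) (acc : List String) :
    l.foldl setupStepA (d, acc) =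
      (l.foldl dStepA d, acc ++ l.map (fun p => if p.2 = ' ' then " " else "-")) := by
  induction l generalizing d acc with
  | nil => simp
  | cons p l ih =>
    by_cases h : p.2 = ' '
    · simp [setupStepA, dStepA, chStr_ne_space, h, ih, List.foldl_cons]
    · simp [setupStepA, dStepA, chStr_ne_space, h, ih, List.foldl_cons]

theorem dfold_filter (l : List (Int × Char)) (d : PySem.Dict String (List Int)) :
    l.foldl dStepA d =
      ((l.filter (fun p => decide (p.2 ≠ ' '))).map (fun p => (chStr p.2, p.1))).foldl
        (fun d q => d.modify q.1 [] (· ++ [q.2])) d := by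
  induction l generalizing d with
  | nil => rfl
  | cons p l ih =>
    by_cases h : p.2 = ' '
    · simp [dStepA, chStr_ne_space, h, ih, List.foldl_cons]
    · simp [dStepA, chStr_ne_space, h, ih, List.foldl_cons]

theorem dedup_map_chStr (l : List Char) :
    PySem.List.dedup (l.map chStr) = (PySem.List.dedup l).map chStr := by
  induction l using List.reverseRecOn with
  | nil => rfl
  | append_singleton l x ih =>
    have hmem : (chStr x ∈ (PySem.List.dedup l).map chStr) ↔ x ∈ PySem.List.dedup l := by
      constructor
      · rintro h
        obtain ⟨y, hy, he⟩ := List.mem_map.mp h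
        exact (chStr_inj he) ▸ hy
      · exact fun h => List.mem_map_of_mem h
    simp only [List.map_append, List.map_cons, List.map_nil, PySem.List.dedup_eq_ofList] at *
    rw [PySem.Set.ofList_append_singleton, PySem.Set.ofList_append_singleton, ih]
    by_cases h : x ∈ PySem.Set.ofList l
    · simp_all [PySem.Set.add, PySem.Set.contains]
    · simp_all [PySem.Set.add, PySem.Set.contains]

theorem dedup_filter (q : Char → Bool) (l : List Char) :
    PySem.List.dedup (l.filter q) = (PySem.List.dedup l).filter q := by
  induction l using List.reverseRecOn with
  | nil => rfl
  | append_singleton l x ih =>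
    simp only [List.filter_append, PySem.List.dedup_eq_ofList] at *
    rw [PySem.Set.ofList_append_singleton]
    by_cases hq : q x
    · have hx : List.filter q [x] = [x] := by simp [hq]
      rw [hx, PySem.Set.ofList_append_singleton, ih]
      by_cases h : x ∈ PySem.Set.ofList l
      · have h' : x ∈ (PySem.Set.ofList l).filter q := List.mem_filter.mpr ⟨h, hq⟩
        simp_all [PySem.Set.add, PySem.Set.contains]
      · have h' : x ∉ (PySem.Set.ofList l).filter q := fun hc => h (List.mem_filter.mp hc).1
        simp_all [PySem.Set.add, PySem.Set.contains]
    · have hx : List.filter q [x] = [] := by simp [hq]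
      rw [hx, List.append_nil, ih]
      by_cases h : x ∈ PySem.Set.ofList l
      · simp_all [PySem.Set.add, PySem.Set.contains]
      · simp_all [PySem.Set.add, PySem.Set.contains, List.filter_append]

theorem filter_map_enum (cs : List Char) (s : Int) (q : Char → Bool) (f : Char → String) :
    ((PySem.List.enumerate cs s).filter (fun p => q p.2)).map (fun p => f p.2) =
      (cs.filter q).map f := by
  induction cs generalizing s with
  | nil => rfl
  | cons c cs ih =>
    by_cases h : q c
    · simp [PySem.List.enumerate_cons, h, ih]
    · simp [PySem.List.enumerate_cons, h, ih]

theorem chStr_injective : Function.Injective chStr := fun _ _ h => chStr_inj h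

theorem map_enum_snd (cs : List Char) (s : Int) (f : Char → String) :
    (PySem.List.enumerate cs s).map (fun p => f p.2) = cs.map f := by
  simpa using filter_map_enum cs s (fun _ => true) f

theorem dict_part (cs : List Char) :
    ((PySem.List.enumerate cs 0).foldl dStepA PySem.Dict.empty).items =
      ((PySem.List.dedup cs).filter (fun c => decide (c ≠ ' '))).map
        (fun c => (chStr c,
          ((PySem.List.enumerate cs 0).filter (fun p => decide (p.2 = c))).map (·.1))) := by
  rw [dfold_filter]
  set l' := (PySem.List.enumerate cs 0).filter (fun p => decide (p.2 ≠ ' ')) with hl'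
  set pairs := l'.map (fun p => (chStr p.2, p.1)) with hpairs
  set D := pairs.foldl (fun d q => d.modify q.1 [] (· ++ [q.2])) PySem.Dict.empty with hD
  have hk1 : pairs.map (·.1) = (cs.filter (fun c => decide (c ≠ ' '))).map chStr := by
    rw [hpairs, List.map_map]
    exact filter_map_enum cs 0 (fun c => decide (c ≠ ' ')) chStr
  have hkeys : D.keys = ((PySem.List.dedup cs).filter (fun c => decide (c ≠ ' '))).map chStr := by
    have h0 := PySem.Dict.keys_foldl_modify_key pairs (fun q => q.1) []
      (fun _ q v => v ++ [q.2]) PySem.Dict.empty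
    rw [PySem.Dict.keys_empty] at h0
    have h1 : PySem.Set.update ([] : List String) (pairs.map (fun q => q.1)) =
        PySem.Set.ofList (pairs.map (fun q => q.1)) := rfl
    rw [h1, hk1] at h0
    rw [hD, h0, ← PySem.List.dedup_eq_ofList, dedup_map_chStr, dedup_filter]
  have hnodup : D.keys.Nodup := by
    rw [hkeys]
    exact (((PySem.List.nodup_dedup cs).filter _).map chStr_injective)
  have hgetD : ∀ c ∈ (PySem.List.dedup cs).filter (fun c => decide (c ≠ ' ')),
      D.getD (chStr c) [] =
        ((PySem.List.enumerate cs 0).filter (fun p => decide (p.2 = c))).map (·.1) := by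
    intro c hc
    have hcne : c ≠ ' ' := by simpa using (List.mem_filter.mp hc).2
    have h1 := PySem.Dict.getD_foldl_modify_append pairs PySem.Dict.empty (chStr c)
    rw [PySem.Dict.getD_empty, List.nil_append] at h1
    rw [hD, h1, hpairs, List.filter_map, List.map_map, hl', List.filter_filter]
    have hcong : ∀ p ∈ PySem.List.enumerate cs 0,
        (((fun p => p.1 == chStr c) ∘ fun p => (chStr p.2, p.1)) p &&
          decide (p.2 ≠ ' ')) = decide (p.2 = c) := by
      intro p _
      by_cases h : p.2 = c
      · simp [Function.comp, h, hcne]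
      · have : chStr p.2 ≠ chStr c := fun he => h (chStr_inj he)
        simp [Function.comp, h, this]
    rw [List.filter_congr hcong]
    rfl
  rw [PySem.Dict.items_eq_map_keys D hnodup [], hkeys, List.map_map]
  exact List.map_congr_left (fun c hc => by
    simp only [Function.comp]
    rw [hgetD c hc])

-- ===== VERDICT (by name: the statement is the Claim_ definition above) =====
theorem setup_game_spec : Claim_equal_setup_game := by
  intro phrase _
  unfold Spec_setup_game
  simp only [setup_game, setup_game_alt, foldA_split, List.nil_append]
  refine Prod.ext ?_ ?_
  · exact dict_part phrase.toList
  · have := map_enum_snd phrase.toList 0 (fun ch => if ch = ' ' then " " else "-")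
    simpa using this
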